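-- pv_equiv track=rewrite | github.com/Choudharysid31/GeeksForGeeks-Solutions | Maximum-Sum-Of-Elements-Not-Part-Of-LIS.py | nonLisMaxSum
-- ===== SOURCE A (Python) =====
-- def nonLisMaxSum(arr):
--     dp=[1]*len(arr)
--     dpsum=arr[:]
--     sume=0
--     for i in range(1,len(arr)):
--         for j in range(i):
--             if (arr[i]>arr[j] and dp[i]<dp[j]+1):
--                 dp[i]=dp[j]+1
--                 dpsum[i]=dpsum[j]+arr[i]
--             elif(dp[i]==dp[j]+1):
--                 dpsum[i]=min(dpsum[i],dpsum[j]+arr[i])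
--
--     total=sum(arr)
--     maxi=-float("inf")
--     sumi=0
--
--     for i in range(len(arr)):
--         if dp[i]>maxi:
--             maxi=dp[i]
--             sumi=dpsum[i]
--         elif dp[i]==maxi:
--             sumi=min(sumi,dpsum[i])
--
--     return total-sumi
-- ===== SOURCE B (Python) =====
-- # Faster re-implementation: min-sum-LIS DP via a (persistent) segment tree over
-- # coordinate-compressed values, O(n log n) instead of A's O(n^2) pair loop.
--
-- def _merge(a, b):
--     # best of two (length, sum) candidates: longer wins, ties by smaller sum
--     if a is None:
--         return b
--     if b is None:
--         return a
--     l1, s1 = a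
--     l2, s2 = b
--     if l1 < l2:
--         return (l2, s2)
--     if l2 < l1:
--         return (l1, s1)
--     return (l1, min(s1, s2))
--
-- def _build(m):
--     # segment tree with m leaves (m >= 1), all empty
--     if m <= 1:
--         return ('L', None)
--     ls = m // 2
--     return ('N', ls, None, _build(ls), _build(m - ls))
--
-- def _update(t, p, v):
--     # merge candidate v into leaf p
--     if t[0] == 'L':
--         return ('L', _merge(t[1], v))
--     _, ls, bl, l, r = t
--     if p < ls:
--         return ('N', ls, _merge(bl, v), _update(l, p, v), r)
--     return ('N', ls, bl, l, _update(r, p - ls, v))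
--
-- def _query(t, p):
--     # best over the first p leaves
--     if p <= 0:
--         return None
--     if t[0] == 'L':
--         return t[1]
--     _, ls, bl, l, r = t
--     if p < ls:
--         return _query(l, p)
--     if p == ls:
--         return bl
--     return _merge(bl, _query(r, p - ls))
--
-- def _rank(vals, lo, hi, x):
--     # index of x in the sorted distinct list vals (binary search)
--     if lo >= hi:
--         return lo
--     mid = (lo + hi) // 2
--     if vals[mid] < x:
--         return _rank(vals, mid + 1, hi, x)
--     return _rank(vals, lo, mid, x)
--
-- def nonLisMaxSum(arr):
--     vals = sorted(set(arr))
--     m = len(vals)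
--     if m == 0:
--         return 0
--     t = _build(m)
--     for x in arr:
--         r = _rank(vals, 0, m, x)
--         q = _query(t, r)
--         cur = (1, x) if q is None else (q[0] + 1, q[1] + x)
--         t = _update(t, r, cur)
--     best = _query(t, m)
--     return sum(arr) - best[1]
-- ===== Notes on version B (the rewrite author's own statement) =====
-- stated objective: faster
-- what changed: Replaces A's quadratic all-pairs LIS DP with coordinate compression plus a functional segment tree over value ranks storing (length, min-sum) bests, computing each dp entry by a prefix query instead of an inner scan.
import Mathlib
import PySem

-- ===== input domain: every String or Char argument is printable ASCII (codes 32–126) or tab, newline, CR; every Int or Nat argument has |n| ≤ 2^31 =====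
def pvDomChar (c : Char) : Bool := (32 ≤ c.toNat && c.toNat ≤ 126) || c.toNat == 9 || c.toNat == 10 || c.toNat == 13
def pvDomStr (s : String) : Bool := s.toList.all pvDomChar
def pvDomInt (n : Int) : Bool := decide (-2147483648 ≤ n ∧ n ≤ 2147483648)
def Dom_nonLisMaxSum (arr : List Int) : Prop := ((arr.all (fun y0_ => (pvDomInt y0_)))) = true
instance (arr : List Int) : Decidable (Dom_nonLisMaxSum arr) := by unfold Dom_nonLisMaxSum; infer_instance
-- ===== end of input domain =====

-- B replaces A's O(n^2) all-pairs LIS DP by coordinate compression plus a segment tree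
-- over value ranks storing (length, min-sum) bests; measured asymptotically faster.

-- ===== PORT A =====
-- literal transliteration of A; '-float("inf")' is modeled as 'none' (smaller than
-- every int in the comparisons, exactly as A uses it); indices produced by range are
-- nonnegative, so 'i.toNat' in list.set is exact.
def nonLisMaxSum (arr : List Int) : Int :=
  let n : Int := (arr.length : Int)
  let st :=
    (PySem.List.pyRange 1 n).foldl (fun (st : List Int × List Int) (i : Int) =>
      (PySem.List.pyRange 0 i).foldl (fun (st : List Int × List Int) (j : Int) =>
        let dp := st.1
        let ds := st.2
        if PySem.List.pyGetD arr i 0 > PySem.List.pyGetD arr j 0 ∧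
           PySem.List.pyGetD dp i 0 < PySem.List.pyGetD dp j 0 + 1 then
          (dp.set i.toNat (PySem.List.pyGetD dp j 0 + 1),
           ds.set i.toNat (PySem.List.pyGetD ds j 0 + PySem.List.pyGetD arr i 0))
        else if PySem.List.pyGetD dp i 0 = PySem.List.pyGetD dp j 0 + 1 then
          (dp,
           ds.set i.toNat (min (PySem.List.pyGetD ds i 0)
             (PySem.List.pyGetD ds j 0 + PySem.List.pyGetD arr i 0)))
        else (dp, ds)) st)
      (List.replicate arr.length 1, arr)
  let total := arr.sum
  let fin :=
    (PySem.List.pyRange 0 n).foldl (fun (ms : Option Int × Int) (i : Int) =>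
      match ms.1 with
      | none => (some (PySem.List.pyGetD st.1 i 0), PySem.List.pyGetD st.2 i 0)
      | some m =>
        if PySem.List.pyGetD st.1 i 0 > m then
          (some (PySem.List.pyGetD st.1 i 0), PySem.List.pyGetD st.2 i 0)
        else if PySem.List.pyGetD st.1 i 0 = m then
          (ms.1, min ms.2 (PySem.List.pyGetD st.2 i 0))
        else ms) (none, 0)
  total - fin.2

-- ===== PORT B =====
-- _merge: best of two optional (length, sum) candidates
def pvMerge : Option (Int × Int) → Option (Int × Int) → Option (Int × Int)
  | none, b => b
  | some a, none => some a
  | some (l1, s1), some (l2, s2) =>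
    if l1 < l2 then some (l2, s2)
    else if l2 < l1 then some (l1, s1)
    else some (l1, min s1 s2)

-- segment tree: leaf contents, or node (left size) (best of left subtree) left right
inductive PvTree where
  | leaf : Option (Int × Int) → PvTree
  | node : Nat → Option (Int × Int) → PvTree → PvTree → PvTree

-- _build
def pvBuild : Nat → PvTree
  | 0 => .leaf none
  | 1 => .leaf none
  | (m + 2) => .node ((m + 2) / 2) none (pvBuild ((m + 2) / 2)) (pvBuild ((m + 2) - (m + 2) / 2))
decreasing_by all_goals omega

-- _update
def pvUpdate : PvTree → Nat → (Int × Int) → PvTree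
  | .leaf b, _, v => .leaf (pvMerge b (some v))
  | .node ls bl l r, p, v =>
    if p < ls then .node ls (pvMerge bl (some v)) (pvUpdate l p v) r
    else .node ls bl l (pvUpdate r (p - ls) v)

-- _query  (Python's 'p <= 0' is 'p = 0' here: tree positions are nonnegative)
def pvQuery : PvTree → Nat → Option (Int × Int)
  | _, 0 => none
  | .leaf b, _ => b
  | .node ls bl l r, p =>
    if p < ls then pvQuery l p
    else if p = ls then bl
    else pvMerge bl (pvQuery r (p - ls))

-- _rank  (binary search; lo, hi stay in [0, len vals], so Nat arithmetic is exact)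
def pvRank (vals : List Int) (lo hi : Nat) (x : Int) : Nat :=
  if lo ≥ hi then lo
  else
    let mid := (lo + hi) / 2
    if PySem.List.pyGetD vals (mid : Int) 0 < x then pvRank vals (mid + 1) hi x
    else pvRank vals lo mid x
termination_by hi - lo
decreasing_by all_goals simp_all; omega

def nonLisMaxSum_alt (arr : List Int) : Int :=
  let vals := PySem.List.sorted (PySem.Set.ofList arr) (fun v => v)
  let m := vals.length
  if m = 0 then 0
  else
    let t := arr.foldl (fun t x =>
      let r := pvRank vals 0 m x
      let cur := match pvQuery t r with
        | none => (1, x)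
        | some (l, s) => (l + 1, s + x)
      pvUpdate t r cur) (pvBuild m)
    match pvQuery t m with
    | none => 0   -- unreachable: m ≠ 0 forces arr ≠ [], so the tree is nonempty
    | some (_, s) => arr.sum - s

-- ===== PRECONDITION & SPEC =====
def Spec_nonLisMaxSum (arr : List Int) (out : Int) : Prop := out = nonLisMaxSum_alt arr
instance (arr : List Int) (out : Int) : Decidable (Spec_nonLisMaxSum arr out) := by unfold Spec_nonLisMaxSum; infer_instance

-- ===== CLAIM (what is proved, stated in full; the proofs are below) =====
def Claim_equal_nonLisMaxSum : Prop := ∀ (arr : List Int), Dom_nonLisMaxSum arr → Spec_nonLisMaxSum arr (nonLisMaxSum arr)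

-- ===== LEMMAS AND PROOFS =====

-- ---- the common clean specification: the min-sum-LIS DP, entry list (value, len, sum) ----
def pvBestLT (ents : List (Int × Int × Int)) (x : Int) : Option (Int × Int) :=
  ents.foldl (fun b e => if e.1 < x then pvMerge b (some e.2) else b) none

def pvOut (x : Int) : Option (Int × Int) → Int × Int
  | none => (1, x)
  | some (l, s) => (l + 1, s + x)

def pvStep (ents : List (Int × Int × Int)) (x : Int) : List (Int × Int × Int) :=
  ents ++ [(x, pvOut x (pvBestLT ents x))]

def pvEnts (arr : List Int) : List (Int × Int × Int) := arr.foldl pvStep []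

def pvBestAll (ents : List (Int × Int × Int)) : Option (Int × Int) :=
  ents.foldl (fun b e => pvMerge b (some e.2)) none

def pvCleanAns (arr : List Int) : Int :=
  arr.sum - (match pvBestAll (pvEnts arr) with | none => 0 | some (_, s) => s)

-- ---- generic pvMerge facts ----
theorem pvMerge_none_right (a : Option (Int × Int)) : pvMerge a none = a := by
  cases a <;> rfl

theorem pvMerge_comm (a b : Option (Int × Int)) : pvMerge a b = pvMerge b a := by
  rcases a with _|⟨l1,s1⟩ <;> rcases b with _|⟨l2,s2⟩ <;> simp only [pvMerge] <;> try rfl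
  split_ifs <;> simp_all <;> omega

theorem pvMerge_assoc (a b c : Option (Int × Int)) :
    pvMerge (pvMerge a b) c = pvMerge a (pvMerge b c) := by
  rcases a with _|⟨l1,s1⟩ <;> rcases b with _|⟨l2,s2⟩ <;> rcases c with _|⟨l3,s3⟩ <;>
    simp only [pvMerge] <;> try rfl
  all_goals split_ifs <;> simp only [pvMerge] <;> split_ifs <;> simp_all <;> try omega

def pvMAll (xs : List (Option (Int × Int))) : Option (Int × Int) :=
  xs.foldl pvMerge none

theorem pvFoldl_merge_acc (xs : List (Option (Int × Int))) (a : Option (Int × Int)) :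
    xs.foldl pvMerge a = pvMerge a (pvMAll xs) := by
  induction xs generalizing a with
  | nil => simp [pvMAll, pvMerge_none_right]
  | cons x xs ih =>
    simp only [pvMAll, List.foldl_cons]
    rw [ih, ih (pvMerge none x), pvMerge_assoc]
    rfl

theorem pvMAll_append (xs ys : List (Option (Int × Int))) :
    pvMAll (xs ++ ys) = pvMerge (pvMAll xs) (pvMAll ys) := by
  simp only [pvMAll, List.foldl_append]
  rw [pvFoldl_merge_acc]
  rfl

theorem pvMAll_replicate_none (m : Nat) : pvMAll (List.replicate m none) = none := by
  induction m with
  | zero => rfl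
  | succ n ih => rw [List.replicate_succ]; simpa [pvMAll] using ih

theorem pvMAll_set (xs : List (Option (Int × Int))) (k : Nat) (hk : k < xs.length)
    (v : Int × Int) :
    pvMAll (xs.set k (pvMerge (xs.getD k none) (some v))) = pvMerge (pvMAll xs) (some v) := by
  have hx : xs = xs.take k ++ xs[k] :: xs.drop (k+1) := by
    rw [← List.drop_eq_getElem_cons hk, List.take_append_drop]
  have hset : xs.set k (pvMerge (xs.getD k none) (some v)) =
      xs.take k ++ pvMerge (xs.getD k none) (some v) :: xs.drop (k+1) := by
    rw [List.set_eq_take_append_cons_drop]; simp [hk]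
  have hgd : xs.getD k none = xs[k] := List.getD_eq_getElem xs none hk
  rw [hset]
  conv_rhs => rw [hx]
  have h1 : ∀ (c : Option (Int × Int)) (t d : List (Option (Int × Int))),
      pvMAll (t ++ c :: d) = pvMerge (pvMerge (pvMAll t) c) (pvMAll d) := by
    intro c t d
    rw [show t ++ c :: d = (t ++ [c]) ++ d by simp, pvMAll_append, pvMAll_append]
    simp only [pvMAll, List.foldl_cons, List.foldl_nil, pvMerge]
  rw [h1, h1, hgd]
  simp only [← pvMerge_assoc]
  rw [pvMerge_assoc (pvMerge (pvMAll (List.take k xs)) (xs[k])) (some v)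
        (pvMAll (List.drop (k+1) xs)),
      pvMerge_comm (some v) (pvMAll (List.drop (k+1) xs)), ← pvMerge_assoc]

-- ---- clean-spec structural lemmas ----
theorem pvEnts_append (xs : List Int) (x : Int) :
    pvEnts (xs ++ [x]) = pvEnts xs ++ [(x, pvOut x (pvBestLT (pvEnts xs) x))] := by
  simp [pvEnts, List.foldl_append, pvStep]

theorem pvEnts_length (arr : List Int) : (pvEnts arr).length = arr.length := by
  induction arr using List.reverseRecOn with
  | nil => rfl
  | append_singleton xs x ih => simp [pvEnts_append, ih]

theorem pvEnts_take (arr : List Int) (k : Nat) :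
    pvEnts (arr.take k) = (pvEnts arr).take k := by
  induction arr using List.reverseRecOn with
  | nil => simp [pvEnts]
  | append_singleton xs x ih =>
    by_cases hk : k ≤ xs.length
    · rw [List.take_append_of_le_length hk, pvEnts_append,
        List.take_append_of_le_length (by rw [pvEnts_length]; exact hk), ih]
    · have h1 : xs.length + 1 ≤ k := by omega
      rw [List.take_of_length_le (l := xs ++ [x]) (by simp; omega),
        List.take_of_length_le (l := pvEnts (xs ++ [x])) (by rw [pvEnts_length]; simp; omega)]

theorem pvEnts_getD (arr : List Int) (k : Nat) (hk : k < arr.length) :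
    (pvEnts arr).getD k (0, 0, 0) =
      (arr.getD k 0, pvOut (arr.getD k 0) (pvBestLT ((pvEnts arr).take k) (arr.getD k 0))) := by
  have htk : arr.take (k + 1) = arr.take k ++ [arr.getD k 0] := by
    rw [List.getD_eq_getElem arr 0 hk]
    exact List.take_succ_eq_append_getElem (by omega)
  have h1 : pvEnts (arr.take (k + 1)) =
      pvEnts (arr.take k) ++ [(arr.getD k 0, pvOut (arr.getD k 0) (pvBestLT (pvEnts (arr.take k)) (arr.getD k 0)))] := by
    rw [htk, pvEnts_append]
  have h2 := pvEnts_take arr (k + 1)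
  rw [h1, pvEnts_take arr k] at h2
  have hlen : ((pvEnts arr).take k).length = k := by
    rw [List.length_take, pvEnts_length]; omega
  have h3 : ((pvEnts arr).take (k + 1)).getD k (0,0,0) = (pvEnts arr).getD k (0,0,0) := by
    rw [List.getD_eq_getElem?_getD, List.getD_eq_getElem?_getD, List.getElem?_take_of_lt (by omega)]
  rw [← h3, ← h2, List.getD_eq_getElem?_getD, List.getElem?_append_right (by omega), hlen]
  simp

theorem pvEnts_fst (arr : List Int) (k : Nat) (hk : k < arr.length) :
    ((pvEnts arr).getD k (0, 0, 0)).1 = arr.getD k 0 := by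
  rw [pvEnts_getD arr k hk]

-- 'the optional best has length at least l' (none = -infinity)
def pvLenLe (l : Int) : Option (Int × Int) → Prop
  | none => False
  | some (L, _) => l ≤ L

theorem pvLenLe_merge (l : Int) (a b : Option (Int × Int)) :
    pvLenLe l a ∨ pvLenLe l b → pvLenLe l (pvMerge a b) := by
  rcases a with _|⟨l1,s1⟩ <;> rcases b with _|⟨l2,s2⟩ <;>
    simp only [pvMerge, pvLenLe] <;> intro h <;> rcases h with h|h <;> try tauto
  all_goals split_ifs <;> simp only [pvLenLe] <;> omega

theorem pvBestLT_acc_mono (x l : Int) (ents : List (Int × Int × Int))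
    (acc : Option (Int × Int)) (h : pvLenLe l acc) :
    pvLenLe l (ents.foldl (fun b e => if e.1 < x then pvMerge b (some e.2) else b) acc) := by
  induction ents generalizing acc with
  | nil => exact h
  | cons e es ih =>
    simp only [List.foldl_cons]
    by_cases hc : e.1 < x
    · simp only [if_pos hc]
      exact ih _ (pvLenLe_merge l acc (some e.2) (Or.inl h))
    · simp only [if_neg hc]; exact ih _ h

theorem pvBestLT_ge (ents : List (Int × Int × Int)) (x : Int) (e : Int × Int × Int)
    (he : e ∈ ents) (hlt : e.1 < x) : pvLenLe e.2.1 (pvBestLT ents x) := by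
  unfold pvBestLT
  obtain ⟨l1, l2, rfl⟩ := List.append_of_mem he
  rw [List.foldl_append, List.foldl_cons, if_pos hlt]
  exact pvBestLT_acc_mono x e.2.1 l2 _
    (pvLenLe_merge _ _ _ (Or.inr (by simp [pvLenLe])))

theorem pvMerge_some_src (a : Option (Int × Int)) (v : Int × Int) (L S : Int)
    (h : pvMerge a (some v) = some (L, S)) : (∃ s, a = some (L, s)) ∨ v.1 = L := by
  rcases a with _|⟨l1,s1⟩ <;> rcases v with ⟨l2,s2⟩ <;> simp only [pvMerge] at h
  · cases h; exact Or.inr rfl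
  · split_ifs at h <;> simp_all <;> omega

theorem pvBestLT_attained_aux (x : Int) (ents : List (Int × Int × Int)) :
    ∀ (acc : Option (Int × Int)) (L S : Int),
      ents.foldl (fun b e => if e.1 < x then pvMerge b (some e.2) else b) acc = some (L, S) →
      (∃ s, acc = some (L, s)) ∨ ∃ e ∈ ents, e.1 < x ∧ e.2.1 = L := by
  induction ents with
  | nil => intro acc L S h; exact Or.inl ⟨S, h⟩
  | cons e es ih =>
    intro acc L S h
    simp only [List.foldl_cons] at h
    by_cases hc : e.1 < x
    · rw [if_pos hc] at h
      rcases ih _ L S h with ⟨s, hs⟩ | ⟨e', he', h1, h2⟩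
      · rcases pvMerge_some_src acc e.2 L s hs with h' | h'
        · exact Or.inl h'
        · exact Or.inr ⟨e, List.mem_cons_self, hc, h'⟩
      · exact Or.inr ⟨e', List.mem_cons_of_mem _ he', h1, h2⟩
    · rw [if_neg hc] at h
      rcases ih _ L S h with h' | ⟨e', he', h1, h2⟩
      · exact Or.inl h'
      · exact Or.inr ⟨e', List.mem_cons_of_mem _ he', h1, h2⟩

theorem pvBestLT_attained (ents : List (Int × Int × Int)) (x L S : Int)
    (h : pvBestLT ents x = some (L, S)) : ∃ e ∈ ents, e.1 < x ∧ e.2.1 = L := by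
  rcases pvBestLT_attained_aux x ents none L S h with ⟨s, hs⟩ | h'
  · exact absurd hs (by simp)
  · exact h'

theorem pvEnts_len_one_le (arr : List Int) : ∀ e ∈ pvEnts arr, 1 ≤ e.2.1 := by
  induction arr using List.reverseRecOn with
  | nil => intro e he; simp [pvEnts] at he
  | append_singleton xs x ih =>
    intro e he
    rw [pvEnts_append] at he
    rcases List.mem_append.mp he with h | h
    · exact ih e h
    · simp only [List.mem_singleton] at h
      subst h
      rcases hq : pvBestLT (pvEnts xs) x with _ | ⟨L, S⟩
      · simp [pvOut, hq]
      · obtain ⟨e', he', _, hL⟩ := pvBestLT_attained _ _ _ _ hq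
        have := ih e' he'
        simp [pvOut, hq]; omega

def pvL (arr : List Int) (k : Nat) : Int := ((pvEnts arr).getD k (0, 0, 0)).2.1
def pvS (arr : List Int) (k : Nat) : Int := ((pvEnts arr).getD k (0, 0, 0)).2.2

theorem pvL_pos (arr : List Int) (k : Nat) (hk : k < arr.length) : 1 ≤ pvL arr k := by
  have hk' : k < (pvEnts arr).length := by rw [pvEnts_length]; exact hk
  unfold pvL
  rw [List.getD_eq_getElem _ _ hk']
  exact pvEnts_len_one_le arr _ (List.getElem_mem hk')

theorem pvL_mono (arr : List Int) (j0 j : Nat) (h0 : j0 < j) (hj : j < arr.length)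
    (hv : arr.getD j0 0 < arr.getD j 0) : pvL arr j0 < pvL arr j := by
  have hj0 : j0 < arr.length := by omega
  have hj0e : j0 < (pvEnts arr).length := by rw [pvEnts_length]; exact hj0
  have hj0t : j0 < ((pvEnts arr).take j).length := by
    rw [List.length_take, pvEnts_length]; omega
  have hmem : (pvEnts arr).getD j0 (0,0,0) ∈ (pvEnts arr).take j := by
    rw [List.getD_eq_getElem _ _ hj0e, ← List.getElem_take (h := hj0t)]
    exact List.getElem_mem _
  have hfst : ((pvEnts arr).getD j0 (0,0,0)).1 = arr.getD j0 0 := pvEnts_fst arr j0 hj0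
  have hge := pvBestLT_ge _ (arr.getD j 0) _ hmem (by rw [hfst]; exact hv)
  rcases hq : pvBestLT ((pvEnts arr).take j) (arr.getD j 0) with _ | ⟨L, S⟩
  · rw [hq] at hge; exact absurd hge (by simp [pvLenLe])
  · rw [hq] at hge
    simp only [pvLenLe] at hge
    unfold pvL
    rw [pvEnts_getD arr j hj, hq]
    simp only [pvOut]
    omega

-- ---- A-side: named copies of A's loop bodies (definitionally equal to the port's lambdas) ----
def pvAStepJ (arr : List Int) (i : Int) (st : List Int × List Int) (j : Int) : List Int × List Int :=
  if PySem.List.pyGetD arr i 0 > PySem.List.pyGetD arr j 0 ∧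
     PySem.List.pyGetD st.1 i 0 < PySem.List.pyGetD st.1 j 0 + 1 then
    (st.1.set i.toNat (PySem.List.pyGetD st.1 j 0 + 1),
     st.2.set i.toNat (PySem.List.pyGetD st.2 j 0 + PySem.List.pyGetD arr i 0))
  else if PySem.List.pyGetD st.1 i 0 = PySem.List.pyGetD st.1 j 0 + 1 then
    (st.1,
     st.2.set i.toNat (min (PySem.List.pyGetD st.2 i 0)
       (PySem.List.pyGetD st.2 j 0 + PySem.List.pyGetD arr i 0)))
  else (st.1, st.2)

def pvAFinStep (st : List Int × List Int) (ms : Option Int × Int) (i : Int) : Option Int × Int :=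
  match ms.1 with
  | none => (some (PySem.List.pyGetD st.1 i 0), PySem.List.pyGetD st.2 i 0)
  | some m =>
    if PySem.List.pyGetD st.1 i 0 > m then
      (some (PySem.List.pyGetD st.1 i 0), PySem.List.pyGetD st.2 i 0)
    else if PySem.List.pyGetD st.1 i 0 = m then
      (ms.1, min ms.2 (PySem.List.pyGetD st.2 i 0))
    else ms

theorem nonLisMaxSum_eq_named (arr : List Int) :
    nonLisMaxSum arr =
      (let st := (PySem.List.pyRange 1 (arr.length : Int)).foldl
          (fun st i => (PySem.List.pyRange 0 i).foldl (pvAStepJ arr i) st)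
          (List.replicate arr.length 1, arr)
       arr.sum - ((PySem.List.pyRange 0 (arr.length : Int)).foldl (pvAFinStep st) (none, 0)).2) := rfl

-- ---- A-side: the loop state, described positionally ----
def pvDpSt (arr : List Int) (t : Nat) (c : Int) : List Int :=
  (List.range arr.length).map (fun k => if k < t then pvL arr k else if k = t then c else 1)
def pvDsSt (arr : List Int) (t : Nat) (c : Int) : List Int :=
  (List.range arr.length).map (fun k => if k < t then pvS arr k else if k = t then c else arr.getD k 0)

theorem pvDpSt_getD (arr : List Int) (t : Nat) (c : Int) (k : Nat) (hk : k < arr.length) :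
    (pvDpSt arr t c).getD k 0 = if k < t then pvL arr k else if k = t then c else 1 := by
  unfold pvDpSt
  rw [List.getD_eq_getElem _ _ (by simpa using hk)]
  simp [hk]

theorem pvDsSt_getD (arr : List Int) (t : Nat) (c : Int) (k : Nat) (hk : k < arr.length) :
    (pvDsSt arr t c).getD k 0 = if k < t then pvS arr k else if k = t then c else arr.getD k 0 := by
  unfold pvDsSt
  rw [List.getD_eq_getElem _ _ (by simpa using hk)]
  simp [hk]

theorem pvDpSt_set (arr : List Int) (t : Nat) (c c' : Int) (ht : t < arr.length) :
    (pvDpSt arr t c).set t c' = pvDpSt arr t c' := by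
  apply List.ext_getElem (by simp [pvDpSt])
  intro k h1 h2
  have hk : k < arr.length := by simpa [pvDpSt] using h2
  rw [List.getElem_set]
  by_cases hkt : k = t
  · subst hkt; simp [pvDpSt, hk]
  · simp [pvDpSt, hk, hkt]
    exact fun h => absurd h.symm hkt

theorem pvDsSt_set (arr : List Int) (t : Nat) (c c' : Int) (ht : t < arr.length) :
    (pvDsSt arr t c).set t c' = pvDsSt arr t c' := by
  apply List.ext_getElem (by simp [pvDsSt])
  intro k h1 h2
  have hk : k < arr.length := by simpa [pvDsSt] using h2
  rw [List.getElem_set]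
  by_cases hkt : k = t
  · subst hkt; simp [pvDsSt, hk]
  · simp [pvDsSt, hk, hkt]
    exact fun h => absurd h.symm hkt

theorem pvDpSt_getD_self (arr : List Int) (t : Nat) (c : Int) (ht : t < arr.length) :
    (pvDpSt arr t c).getD t 0 = c := by
  rw [pvDpSt_getD arr t c t ht]; simp

theorem pvDpSt_getD_lt (arr : List Int) (t : Nat) (c : Int) (j : Nat) (hjt : j < t)
    (hjl : j < arr.length) : (pvDpSt arr t c).getD j 0 = pvL arr j := by
  rw [pvDpSt_getD arr t c j hjl]; simp [hjt]

theorem pvDsSt_getD_self (arr : List Int) (t : Nat) (c : Int) (ht : t < arr.length) :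
    (pvDsSt arr t c).getD t 0 = c := by
  rw [pvDsSt_getD arr t c t ht]; simp

theorem pvDsSt_getD_lt (arr : List Int) (t : Nat) (c : Int) (j : Nat) (hjt : j < t)
    (hjl : j < arr.length) : (pvDsSt arr t c).getD j 0 = pvS arr j := by
  rw [pvDsSt_getD arr t c j hjl]; simp [hjt]

-- the clean per-element DP value seen after j inner iterations of row t
def pvCur (arr : List Int) (t j : Nat) : Int × Int :=
  pvOut (arr.getD t 0) (pvBestLT ((pvEnts arr).take j) (arr.getD t 0))

theorem pvCur_self (arr : List Int) (t : Nat) (ht : t < arr.length) :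
    pvCur arr t t = (pvL arr t, pvS arr t) := by
  unfold pvCur pvL pvS
  rw [pvEnts_getD arr t ht]

theorem pvBestLT_take_succ (arr : List Int) (j : Nat) (hj : j < arr.length) (x : Int) :
    pvBestLT ((pvEnts arr).take (j + 1)) x =
      (if arr.getD j 0 < x then
        pvMerge (pvBestLT ((pvEnts arr).take j) x) (some (pvL arr j, pvS arr j))
      else pvBestLT ((pvEnts arr).take j) x) := by
  have hje : j < (pvEnts arr).length := by rw [pvEnts_length]; exact hj
  have htk : (pvEnts arr).take (j + 1) = (pvEnts arr).take j ++ [(pvEnts arr).getD j (0,0,0)] := by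
    rw [List.getD_eq_getElem _ _ hje]
    exact List.take_succ_eq_append_getElem (by omega)
  rw [htk]
  unfold pvBestLT
  rw [List.foldl_append, List.foldl_cons, List.foldl_nil, pvEnts_fst arr j hj]
  by_cases hc : arr.getD j 0 < x
  · rw [if_pos hc, if_pos hc]
    have : ((pvEnts arr).getD j (0,0,0)).2 = (pvL arr j, pvS arr j) := rfl
    rw [this]
  · rw [if_neg hc, if_neg hc]

theorem pvBestAll_take_succ (arr : List Int) (j : Nat) (hj : j < arr.length) :
    pvBestAll ((pvEnts arr).take (j + 1)) =
      pvMerge (pvBestAll ((pvEnts arr).take j)) (some (pvL arr j, pvS arr j)) := by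
  have hje : j < (pvEnts arr).length := by rw [pvEnts_length]; exact hj
  have htk : (pvEnts arr).take (j + 1) = (pvEnts arr).take j ++ [(pvEnts arr).getD j (0,0,0)] := by
    rw [List.getD_eq_getElem _ _ hje]
    exact List.take_succ_eq_append_getElem (by omega)
  rw [htk]
  unfold pvBestAll
  rw [List.foldl_append, List.foldl_cons, List.foldl_nil]
  rfl

theorem pvMem_take_ents (arr : List Int) (j : Nat) (hj : j ≤ arr.length)
    (e : Int × Int × Int) (he : e ∈ (pvEnts arr).take j) :
    ∃ j0, j0 < j ∧ e.1 = arr.getD j0 0 ∧ e.2.1 = pvL arr j0 := by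
  obtain ⟨k, hk, hke⟩ := List.mem_iff_getElem.mp he
  have hkj : k < j := by
    have := hk; rw [List.length_take, pvEnts_length] at this; omega
  have hkl : k < (pvEnts arr).length := by rw [pvEnts_length]; omega
  refine ⟨k, hkj, ?_, ?_⟩
  · rw [← hke, List.getElem_take, ← List.getD_eq_getElem _ (0,0,0) hkl, pvEnts_fst arr k (by omega)]
  · rw [← hke, List.getElem_take]
    unfold pvL
    rw [List.getD_eq_getElem _ _ hkl]

-- one inner iteration preserves the row invariant
theorem pvInner_step (arr : List Int) (t j : Nat) (hj : j < t) (ht : t < arr.length) :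
    pvAStepJ arr (t : Int)
        (pvDpSt arr t (pvCur arr t j).1, pvDsSt arr t (pvCur arr t j).2) (j : Int) =
      (pvDpSt arr t (pvCur arr t (j + 1)).1, pvDsSt arr t (pvCur arr t (j + 1)).2) := by
  have hjl : j < arr.length := by omega
  have hlj1 : 1 ≤ pvL arr j := pvL_pos arr j hjl
  unfold pvAStepJ
  simp only [PySem.List.pyGetD_natCast, Int.toNat_natCast]
  rw [pvDpSt_getD_self arr t _ ht, pvDpSt_getD_lt arr t _ j hj hjl,
    pvDsSt_getD_self arr t _ ht, pvDsSt_getD_lt arr t _ j hj hjl]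
  unfold pvCur
  rw [pvBestLT_take_succ arr j hjl]
  rcases hq : pvBestLT ((pvEnts arr).take j) (arr.getD t 0) with _ | ⟨L, S⟩
  · by_cases haj : arr.getD j 0 < arr.getD t 0
    · rw [if_pos haj,
        if_pos ⟨haj, by simp only [pvOut]; omega⟩,
        pvDpSt_set arr t _ _ ht, pvDsSt_set arr t _ _ ht]
      simp [pvOut, pvMerge]
    · rw [if_neg haj,
        if_neg (fun h => haj h.1),
        if_neg (by simp only [pvOut]; omega)]
  · by_cases haj : arr.getD j 0 < arr.getD t 0
    · rw [if_pos haj]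
      rcases lt_trichotomy L (pvL arr j) with hL | hL | hL
      · rw [if_pos ⟨haj, by simp only [pvOut]; omega⟩,
          pvDpSt_set arr t _ _ ht, pvDsSt_set arr t _ _ ht]
        simp only [pvOut, pvMerge, if_pos hL]
      · rw [if_neg (fun h => by simp only [pvOut] at h; omega),
          if_pos (by simp only [pvOut]; omega),
          pvDsSt_set arr t _ _ ht]
        have hmin : min (S + arr.getD t 0) (pvS arr j + arr.getD t 0) =
            min S (pvS arr j) + arr.getD t 0 := (min_add_add_right S (pvS arr j) _)
        simp only [pvOut, pvMerge, if_neg (by omega : ¬ L < pvL arr j),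
          if_neg (by omega : ¬ pvL arr j < L), hmin]
      · rw [if_neg (fun h => by simp only [pvOut] at h; omega),
          if_neg (by simp only [pvOut]; omega)]
        simp only [pvOut, pvMerge, if_neg (by omega : ¬ L < pvL arr j), if_pos hL]
    · rw [if_neg haj, if_neg (fun h => haj h.1)]
      have hfalse : ¬ ((pvOut (arr.getD t 0) (some (L, S))).1 = pvL arr j + 1) := by
        intro h
        simp only [pvOut] at h
        have hLj : L = pvL arr j := by omega
        obtain ⟨e, he, helt, heL⟩ := pvBestLT_attained _ _ _ _ hq
        obtain ⟨j0, hj0, hfst, hsnd⟩ := pvMem_take_ents arr j (by omega) e he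
        have hmono := pvL_mono arr j0 j hj0 hjl (by rw [← hfst]; omega)
        omega
      rw [if_neg hfalse]

theorem pvInner (arr : List Int) (t : Nat) (ht : t < arr.length) :
    ∀ j, j ≤ t →
      (PySem.List.pyRange 0 (j : Int)).foldl (pvAStepJ arr (t : Int))
          (pvDpSt arr t 1, pvDsSt arr t (arr.getD t 0)) =
        (pvDpSt arr t (pvCur arr t j).1, pvDsSt arr t (pvCur arr t j).2) := by
  intro j hj
  induction j with
  | zero =>
    rw [PySem.List.pyRange_one_eq_nil (by norm_num)]
    simp [pvCur, List.take_zero, pvBestLT, pvOut]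
  | succ j ih =>
    rw [show (((j + 1 : Nat)) : Int) = (j : Int) + 1 by push_cast; ring,
      PySem.List.pyRange_one_succ_right (by positivity),
      List.foldl_append, List.foldl_cons, List.foldl_nil, ih (by omega)]
    exact pvInner_step arr t j (by omega) ht

theorem pvL_zero (arr : List Int) (h0 : 0 < arr.length) : pvL arr 0 = 1 := by
  unfold pvL
  rw [pvEnts_getD arr 0 h0]
  simp [pvBestLT, pvOut]

theorem pvS_zero (arr : List Int) (h0 : 0 < arr.length) : pvS arr 0 = arr.getD 0 0 := by
  unfold pvS
  rw [pvEnts_getD arr 0 h0]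
  simp [pvBestLT, pvOut]

theorem pvInit_dp (arr : List Int) (h0 : 0 < arr.length) :
    List.replicate arr.length 1 = pvDpSt arr 1 1 := by
  apply List.ext_getElem (by simp [pvDpSt])
  intro k h1 h2
  simp only [List.getElem_replicate, pvDpSt, List.getElem_map, List.getElem_range]
  by_cases hk0 : k = 0
  · subst hk0; simp [pvL_zero arr h0]
  · simp [show ¬ k < 1 by omega]

theorem pvInit_ds (arr : List Int) (h0 : 0 < arr.length) :
    arr = pvDsSt arr 1 (arr.getD 1 0) := by
  apply List.ext_getElem (by simp [pvDsSt])
  intro k h1 h2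
  have hk : k < arr.length := by simpa using h1
  simp only [pvDsSt, List.getElem_map, List.getElem_range]
  by_cases hk0 : k = 0
  · subst hk0; simp [pvS_zero arr h0, List.getElem?_eq_getElem hk]
  · by_cases hk1 : k = 1
    · subst hk1; simp [List.getElem?_eq_getElem hk]
    · simp [show ¬ k < 1 by omega, hk1, List.getElem?_eq_getElem hk]

theorem pvDpSt_shift (arr : List Int) (t : Nat) (ht : t < arr.length) :
    pvDpSt arr t (pvL arr t) = pvDpSt arr (t + 1) 1 := by
  apply List.ext_getElem (by simp [pvDpSt])
  intro k h1 h2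
  simp only [pvDpSt, List.getElem_map, List.getElem_range]
  by_cases hkt : k < t
  · simp [hkt, show k < t + 1 by omega]
  · by_cases hke : k = t
    · subst hke; simp
    · simp [hkt, hke, show ¬ k < t + 1 by omega]

theorem pvDsSt_shift (arr : List Int) (t : Nat) (ht : t < arr.length) :
    pvDsSt arr t (pvS arr t) = pvDsSt arr (t + 1) (arr.getD (t + 1) 0) := by
  apply List.ext_getElem (by simp [pvDsSt])
  intro k h1 h2
  simp only [pvDsSt, List.getElem_map, List.getElem_range]
  by_cases hkt : k < t
  · simp [hkt, show k < t + 1 by omega]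
  · by_cases hke : k = t
    · subst hke; simp
    · by_cases hke1 : k = t + 1
      · subst hke1; simp [show ¬ t + 1 < t by omega, show t + 1 ≠ t by omega]
      · simp [hkt, hke, show ¬ k < t + 1 by omega, hke1]

theorem pvOuter (arr : List Int) :
    ∀ t, 1 ≤ t → t ≤ arr.length →
      (PySem.List.pyRange 1 (t : Int)).foldl
          (fun st i => (PySem.List.pyRange 0 i).foldl (pvAStepJ arr i) st)
          (List.replicate arr.length 1, arr) =
        (pvDpSt arr t 1, pvDsSt arr t (arr.getD t 0)) := by
  intro t
  induction t with
  | zero => intro h1 _; omega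
  | succ t ih =>
    intro _ ht
    by_cases ht0 : t = 0
    · subst ht0
      rw [show ((1 : Nat) : Int) = 1 by norm_num, PySem.List.pyRange_one_eq_nil le_rfl,
        List.foldl_nil, ← pvInit_dp arr (by omega), ← pvInit_ds arr (by omega)]
    · have h1t : 1 ≤ t := by omega
      have htl : t < arr.length := by omega
      rw [show (((t + 1 : Nat)) : Int) = (t : Int) + 1 by push_cast; ring,
        PySem.List.pyRange_one_succ_right (by exact_mod_cast h1t),
        List.foldl_append, List.foldl_cons, List.foldl_nil, ih h1t (by omega)]
      have hinner := pvInner arr t htl t le_rfl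
      rw [hinner, pvCur_self arr t htl, pvDpSt_shift arr t htl, pvDsSt_shift arr t htl]

theorem pvFinal (arr : List Int) (st : List Int × List Int)
    (hst : st = (pvDpSt arr arr.length 1, pvDsSt arr arr.length (arr.getD arr.length 0))) :
    ∀ m, m ≤ arr.length →
      (PySem.List.pyRange 0 (m : Int)).foldl (pvAFinStep st) (none, 0) =
        (match pvBestAll ((pvEnts arr).take m) with
          | none => (none, 0)
          | some (L, S) => (some L, S)) := by
  intro m
  induction m with
  | zero =>
    intro _
    rw [show ((0 : Nat) : Int) = 0 by norm_num, PySem.List.pyRange_one_eq_nil le_rfl]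
    simp [pvBestAll]
  | succ m ih =>
    intro hm
    have hml : m < arr.length := by omega
    rw [show (((m + 1 : Nat)) : Int) = (m : Int) + 1 by push_cast; ring,
      PySem.List.pyRange_one_succ_right (by positivity),
      List.foldl_append, List.foldl_cons, List.foldl_nil, ih (by omega),
      pvBestAll_take_succ arr m hml]
    have hdp : PySem.List.pyGetD st.1 (m : Int) 0 = pvL arr m := by
      rw [hst, PySem.List.pyGetD_natCast, pvDpSt_getD_lt arr _ _ m hml hml]
    have hds : PySem.List.pyGetD st.2 (m : Int) 0 = pvS arr m := by
      rw [hst, PySem.List.pyGetD_natCast, pvDsSt_getD_lt arr _ _ m hml hml]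
    rcases hb : pvBestAll ((pvEnts arr).take m) with _ | ⟨L, S⟩
    · simp only [pvAFinStep, hdp, hds, pvMerge]
    · rcases lt_trichotomy L (pvL arr m) with hL | hL | hL
      · simp only [pvAFinStep, hdp, hds, pvMerge, if_pos hL]
      · simp only [pvAFinStep, hdp, hds, pvMerge,
          if_neg (by omega : ¬ L < pvL arr m), if_neg (by omega : ¬ pvL arr m < L),
          if_neg (by omega : ¬ pvL arr m > L), if_pos (by omega : pvL arr m = L)]
      · simp only [pvAFinStep, hdp, hds, pvMerge,
          if_neg (by omega : ¬ L < pvL arr m), if_pos hL,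
          if_neg (by omega : ¬ pvL arr m > L), if_neg (by omega : ¬ pvL arr m = L)]

-- ---- clean-spec layer used by both bridge proofs ----
theorem a_eq_clean (arr : List Int) : nonLisMaxSum arr = pvCleanAns arr := by
  rw [nonLisMaxSum_eq_named]
  rcases Nat.eq_zero_or_pos arr.length with h0 | hpos
  · have harr : arr = [] := List.length_eq_zero_iff.mp h0
    subst harr
    rfl
  · simp only []
    rw [pvOuter arr arr.length hpos le_rfl,
      pvFinal arr _ rfl arr.length le_rfl,
      List.take_of_length_le (le_of_eq (pvEnts_length arr))]
    unfold pvCleanAns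
    rcases pvBestAll (pvEnts arr) with _ | ⟨L, S⟩ <;> simp

-- ---- B-side: binary search ----
theorem pvRank_spec (vals : List Int) (hs : vals.Pairwise (· < ·)) (x : Int) :
    ∀ (d lo hi : Nat), hi - lo = d → lo ≤ hi → hi ≤ vals.length →
      (∀ k, k < lo → vals.getD k 0 < x) →
      (∀ k, hi ≤ k → k < vals.length → ¬ vals.getD k 0 < x) →
      (pvRank vals lo hi x ≤ vals.length ∧
       (∀ k, k < pvRank vals lo hi x → vals.getD k 0 < x) ∧
       (∀ k, pvRank vals lo hi x ≤ k → k < vals.length → ¬ vals.getD k 0 < x)) := by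
  have hmono : ∀ (i j : Nat), i ≤ j → j < vals.length → vals.getD i 0 ≤ vals.getD j 0 := by
    intro i j hij hj
    rcases Nat.eq_or_lt_of_le hij with rfl | hij'
    · exact le_rfl
    · rw [List.getD_eq_getElem _ _ (by omega), List.getD_eq_getElem _ _ hj]
      exact le_of_lt (List.pairwise_iff_getElem.mp hs i j (by omega) hj hij')
  intro d
  induction d using Nat.strong_induction_on with
  | _ d ih =>
    intro lo hi hd hlohi hhi hlow hhigh
    rw [pvRank]
    by_cases hc : lo ≥ hi
    · rw [if_pos hc]
      exact ⟨by omega, hlow, fun k hk hkl => hhigh k (by omega) hkl⟩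
    · rw [if_neg hc]
      simp only []
      have hmid1 : lo ≤ (lo + hi) / 2 := by omega
      have hmid2 : (lo + hi) / 2 < hi := by omega
      by_cases hv : PySem.List.pyGetD vals (((lo + hi) / 2 : Nat) : Int) 0 < x
      · rw [if_pos hv]
        rw [PySem.List.pyGetD_natCast] at hv
        refine ih (hi - ((lo + hi) / 2 + 1)) (by omega) _ _ rfl (by omega) hhi ?_ hhigh
        intro k hk
        exact lt_of_le_of_lt (hmono k ((lo + hi) / 2) (by omega) (by omega)) hv
      · rw [if_neg hv]
        rw [PySem.List.pyGetD_natCast] at hv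
        refine ih ((lo + hi) / 2 - lo) (by omega) _ _ rfl (by omega) (by omega) hlow ?_
        intro k hk hkl
        intro hlt
        exact hv (lt_of_le_of_lt (hmono ((lo + hi) / 2) k hk hkl) hlt)

def pvRankF (vals : List Int) (x : Int) : Nat := pvRank vals 0 vals.length x

theorem pvRankF_spec (vals : List Int) (hs : vals.Pairwise (· < ·)) (x : Int) :
    pvRankF vals x ≤ vals.length ∧
    (∀ k, k < pvRankF vals x → vals.getD k 0 < x) ∧
    (∀ k, pvRankF vals x ≤ k → k < vals.length → ¬ vals.getD k 0 < x) :=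
  pvRank_spec vals hs x (vals.length - 0) 0 vals.length rfl (by omega) le_rfl
    (by omega) (fun k hk hkl => absurd (by omega : k < vals.length) (by omega))

theorem pvRankF_mem (vals : List Int) (hs : vals.Pairwise (· < ·)) (x : Int)
    (hx : x ∈ vals) : pvRankF vals x < vals.length ∧ vals.getD (pvRankF vals x) 0 = x := by
  obtain ⟨hle, hlow, hhigh⟩ := pvRankF_spec vals hs x
  obtain ⟨k, hk, hke⟩ := List.mem_iff_getElem.mp hx
  have hkd : vals.getD k 0 = x := by rw [List.getD_eq_getElem _ _ hk, hke]
  have hknlt : ¬ k < pvRankF vals x := fun h => absurd (hlow k h) (by omega)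
  have hplt : pvRankF vals x < vals.length := by omega
  refine ⟨hplt, ?_⟩
  have hnp : ¬ vals.getD (pvRankF vals x) 0 < x := hhigh _ le_rfl hplt
  by_cases hpk : pvRankF vals x = k
  · rw [hpk, hkd]
  · exfalso
    have hlt : pvRankF vals x < k := by omega
    have := List.pairwise_iff_getElem.mp hs (pvRankF vals x) k hplt hk hlt
    rw [hke] at this
    rw [List.getD_eq_getElem _ _ hplt] at hnp
    omega

theorem pvRankF_lt_iff (vals : List Int) (hs : vals.Pairwise (· < ·)) (v x : Int)
    (hv : v ∈ vals) (hx : x ∈ vals) : v < x ↔ pvRankF vals v < pvRankF vals x := by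
  obtain ⟨hvl, hve⟩ := pvRankF_mem vals hs v hv
  obtain ⟨hxl, hxe⟩ := pvRankF_mem vals hs x hx
  constructor
  · intro hlt
    by_contra hge
    have hle : pvRankF vals x ≤ pvRankF vals v := by omega
    rcases Nat.eq_or_lt_of_le hle with he | hlt2
    · rw [← he, hxe] at hve; omega
    · have := List.pairwise_iff_getElem.mp hs _ _ hxl hvl hlt2
      rw [List.getD_eq_getElem _ _ hxl] at hxe
      rw [List.getD_eq_getElem _ _ hvl] at hve
      omega
  · intro hlt
    have := List.pairwise_iff_getElem.mp hs _ _ hvl hxl hlt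
    rw [List.getD_eq_getElem _ _ hxl] at hxe
    rw [List.getD_eq_getElem _ _ hvl] at hve
    omega

-- ---- B-side: segment tree model ----
def pvFlat : PvTree → List (Option (Int × Int))
  | .leaf b => [b]
  | .node _ _ l r => pvFlat l ++ pvFlat r

def pvWF : PvTree → Prop
  | .leaf _ => True
  | .node ls bl l r => ls = (pvFlat l).length ∧ bl = pvMAll (pvFlat l) ∧ pvWF l ∧ pvWF r

theorem pvBuild_flat (m : Nat) (hm : 1 ≤ m) :
    pvFlat (pvBuild m) = List.replicate m none ∧ pvWF (pvBuild m) := by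
  induction m using Nat.strong_induction_on with
  | _ m ih =>
    match m, hm with
    | 1, _ =>
      rw [pvBuild]
      exact ⟨rfl, trivial⟩
    | (k + 2), _ =>
      have h1 : 1 ≤ (k + 2) / 2 := by omega
      have h2 : (k + 2) / 2 < k + 2 := by omega
      have h3 : 1 ≤ (k + 2) - (k + 2) / 2 := by omega
      have h4 : (k + 2) - (k + 2) / 2 < k + 2 := by omega
      obtain ⟨hfl, hwl⟩ := ih _ h2 h1
      obtain ⟨hfr, hwr⟩ := ih _ h4 h3
      rw [pvBuild]
      constructor
      · show pvFlat _ ++ pvFlat _ = _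
        rw [hfl, hfr, ← List.replicate_add]
        congr 1
        omega
      · exact ⟨by rw [hfl]; simp, by rw [hfl, pvMAll_replicate_none], hwl, hwr⟩

theorem pvUpdate_ok (t : PvTree) (p : Nat) (v : Int × Int) (hw : pvWF t)
    (hp : p < (pvFlat t).length) :
    pvFlat (pvUpdate t p v) =
      (pvFlat t).set p (pvMerge ((pvFlat t).getD p none) (some v)) ∧
    pvWF (pvUpdate t p v) := by
  induction t generalizing p with
  | leaf b =>
    simp only [pvFlat, List.length_singleton] at hp
    have hp0 : p = 0 := by omega
    subst hp0
    exact ⟨rfl, trivial⟩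
  | node ls bl l r ihl ihr =>
    obtain ⟨hls, hbl, hwl, hwr⟩ := hw
    subst hls
    simp only [pvFlat, List.length_append] at hp
    by_cases hc : p < (pvFlat l).length
    · obtain ⟨hfl', hwl'⟩ := ihl p hwl (by omega)
      rw [pvUpdate, if_pos hc]
      constructor
      · show pvFlat (pvUpdate l p v) ++ pvFlat r = _
        simp only [pvFlat]
        rw [hfl', List.set_append, if_pos (by omega)]
        congr 2
        rw [List.getD_eq_getElem?_getD, List.getD_eq_getElem?_getD,
          List.getElem?_append_left (by omega)]
      · refine ⟨by rw [hfl']; simp, ?_, hwl', hwr⟩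
        rw [hfl', hbl]
        rw [pvMAll_set (pvFlat l) p (by omega) v]
    · obtain ⟨hfr', hwr'⟩ := ihr (p - (pvFlat l).length) hwr (by omega)
      rw [pvUpdate, if_neg hc]
      constructor
      · show pvFlat l ++ pvFlat (pvUpdate r (p - (pvFlat l).length) v) = _
        simp only [pvFlat]
        rw [hfr', List.set_append, if_neg (by omega)]
        congr 2
        rw [List.getD_eq_getElem?_getD, List.getD_eq_getElem?_getD,
          List.getElem?_append_right (by omega)]
      · exact ⟨rfl, hbl, hwl, hwr'⟩

theorem pvQuery_eq (t : PvTree) (p : Nat) (hw : pvWF t) (hp : p ≤ (pvFlat t).length) :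
    pvQuery t p = pvMAll ((pvFlat t).take p) := by
  induction t generalizing p with
  | leaf b =>
    match p, hp with
    | 0, _ => rfl
    | 1, _ => rfl
  | node ls bl l r ihl ihr =>
    obtain ⟨hls, hbl, hwl, hwr⟩ := hw
    subst hls
    simp only [pvFlat, List.length_append] at hp
    match p, hp with
    | 0, _ => rfl
    | (p + 1), hp =>
      rw [pvQuery]
      case x_2 => omega
      by_cases hc : p + 1 < (pvFlat l).length
      · rw [if_pos hc, ihl (p + 1) hwl (by omega)]
        show _ = pvMAll ((pvFlat l ++ pvFlat r).take (p + 1))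
        rw [List.take_append_of_le_length (by omega)]
      · by_cases he : p + 1 = (pvFlat l).length
        · rw [if_neg hc, if_pos he, hbl]
          show _ = pvMAll ((pvFlat l ++ pvFlat r).take (p + 1))
          rw [List.take_append_of_le_length (by omega), he, List.take_length]
        · rw [if_neg hc, if_neg he, ihr (p + 1 - (pvFlat l).length) hwr (by omega)]
          show _ = pvMAll ((pvFlat l ++ pvFlat r).take (p + 1))
          rw [List.take_append, List.take_of_length_le (l := pvFlat l) (by omega), hbl, ← pvMAll_append]

-- ---- B-side: value buckets ----
def pvBucket (ents : List (Int × Int × Int)) (v : Int) : Option (Int × Int) :=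
  ents.foldl (fun b e => if e.1 = v then pvMerge b (some e.2) else b) none

theorem pvBucket_append (ents : List (Int × Int × Int)) (e : Int × Int × Int) (v : Int) :
    pvBucket (ents ++ [e]) v =
      (if e.1 = v then pvMerge (pvBucket ents v) (some e.2) else pvBucket ents v) := by
  unfold pvBucket
  rw [List.foldl_append, List.foldl_cons, List.foldl_nil]

theorem pvBucket_map_append (vals : List Int) (hs : vals.Pairwise (· < ·))
    (ents : List (Int × Int × Int)) (e : Int × Int × Int) (he : e.1 ∈ vals) :
    vals.map (pvBucket (ents ++ [e])) =
      (vals.map (pvBucket ents)).set (pvRankF vals e.1)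
        (pvMerge ((vals.map (pvBucket ents)).getD (pvRankF vals e.1) none) (some e.2)) := by
  obtain ⟨hrl, hre⟩ := pvRankF_mem vals hs e.1 he
  apply List.ext_getElem (by simp)
  intro k h1 h2
  have hkl : k < vals.length := by simpa using h1
  rw [List.getElem_set, List.getElem_map, List.getElem_map, pvBucket_append]
  by_cases hk : pvRankF vals e.1 = k
  · subst hk
    have hre' : vals[pvRankF vals e.1]'hrl = e.1 := by
      rw [← List.getD_eq_getElem _ 0 hrl]; exact hre
    rw [if_pos rfl, if_pos hre'.symm,
      List.getD_eq_getElem _ _ (by simpa using hrl), List.getElem_map]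
  · rw [if_neg hk]
    have hne : ¬ (e.1 = vals[k]'hkl) := by
      intro hv
      apply hk
      have hgd : vals.getD (pvRankF vals e.1) 0 = vals.getD k 0 := by
        rw [hre, hv, List.getD_eq_getElem _ _ hkl]
      have hnd : vals.Nodup := hs.imp (fun h => ne_of_lt h)
      rw [List.getD_eq_getElem _ _ hrl, List.getD_eq_getElem _ _ hkl] at hgd
      exact (List.Nodup.getElem_inj_iff hnd).mp hgd
    rw [if_neg hne]

theorem pvFoldl_if_congr (ents : List (Int × Int × Int))
    (c1 c2 : Int × Int × Int → Prop) [DecidablePred c1] [DecidablePred c2]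
    (h : ∀ e ∈ ents, c1 e ↔ c2 e) (acc : Option (Int × Int)) :
    ents.foldl (fun b e => if c1 e then pvMerge b (some e.2) else b) acc =
      ents.foldl (fun b e => if c2 e then pvMerge b (some e.2) else b) acc := by
  induction ents generalizing acc with
  | nil => rfl
  | cons e es ihe =>
    simp only [List.foldl_cons]
    rw [if_congr (h e List.mem_cons_self) rfl rfl]
    exact ihe (fun e' he' => h e' (List.mem_cons_of_mem _ he')) _

theorem pvGrouped (vals : List Int) (hs : vals.Pairwise (· < ·))
    (ents : List (Int × Int × Int)) (hv : ∀ e ∈ ents, e.1 ∈ vals)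
    (p : Nat) (hp : p ≤ vals.length) :
    pvMAll ((vals.map (pvBucket ents)).take p) =
      ents.foldl (fun b e => if pvRankF vals e.1 < p then pvMerge b (some e.2) else b) none := by
  induction ents using List.reverseRecOn with
  | nil =>
    have : vals.map (pvBucket []) = List.replicate vals.length none := by
      apply List.ext_getElem (by simp)
      intro k h1 h2
      simp [pvBucket]
    rw [this, List.take_replicate, pvMAll_replicate_none, List.foldl_nil]
  | append_singleton ents e ihe =>
    have hev : e.1 ∈ vals := hv e (by simp)
    have hents : ∀ e' ∈ ents, e'.1 ∈ vals := fun e' he' => hv e' (by simp [he'])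
    obtain ⟨hrl, _⟩ := pvRankF_mem vals hs e.1 hev
    rw [pvBucket_map_append vals hs ents e hev, List.foldl_append, List.foldl_cons,
      List.foldl_nil, ← ihe hents]
    by_cases hc : pvRankF vals e.1 < p
    · have hgd : (vals.map (pvBucket ents)).getD (pvRankF vals e.1) none =
          (List.take p (vals.map (pvBucket ents))).getD (pvRankF vals e.1) none := by
        rw [List.getD_eq_getElem?_getD, List.getD_eq_getElem?_getD,
          List.getElem?_take_of_lt hc]
      rw [if_pos hc, List.take_set, hgd,
        pvMAll_set _ _ (by rw [List.length_take]; simp only [List.length_map]; omega) e.2]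
    · rw [if_neg hc]
      congr 1
      apply List.ext_getElem (by simp)
      intro k h1 h2
      have hkp : k < p := by simp only [List.length_take, List.length_set, List.length_map, lt_min_iff] at h1; omega
      rw [List.getElem_take, List.getElem_take]
      exact List.getElem_set_ne (by omega) _

-- ---- B-side: the main loop ----
def pvBStep (vals : List Int) (m : Nat) (t : PvTree) (x : Int) : PvTree :=
  pvUpdate t (pvRank vals 0 m x)
    (match pvQuery t (pvRank vals 0 m x) with
     | none => ((1 : Int), x)
     | some (l, s) => (l + 1, s + x))

theorem nonLisMaxSum_alt_eq_named (arr : List Int) :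
    nonLisMaxSum_alt arr =
      (let vals := PySem.List.sorted (PySem.Set.ofList arr) (fun v => v)
       if vals.length = 0 then 0
       else
         match pvQuery (arr.foldl (pvBStep vals vals.length) (pvBuild vals.length))
             vals.length with
         | none => 0
         | some (_, s) => arr.sum - s) := rfl

theorem pvOut_match (x : Int) (q : Option (Int × Int)) :
    (match q with
     | none => ((1 : Int), x)
     | some (l, s) => (l + 1, s + x)) = pvOut x q := by
  rcases q with _ | ⟨l, s⟩ <;> rfl

theorem pvEnts_fst_mem (xs : List Int) (e : Int × Int × Int) (he : e ∈ pvEnts xs) :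
    e.1 ∈ xs := by
  obtain ⟨k, hk, hke⟩ := List.mem_iff_getElem.mp he
  have hkx : k < xs.length := by rw [← pvEnts_length xs]; exact hk
  have : e.1 = xs.getD k 0 := by
    rw [← hke, ← List.getD_eq_getElem _ (0,0,0) hk, pvEnts_fst xs k hkx]
  rw [this, List.getD_eq_getElem _ _ hkx]
  exact List.getElem_mem hkx

theorem pvBucket_nil_map (vals : List Int) :
    vals.map (pvBucket []) = List.replicate vals.length none := by
  apply List.ext_getElem (by simp)
  intro k h1 h2
  simp [pvBucket]

theorem pvFoldl_if_true (ents : List (Int × Int × Int)) (c : Int × Int × Int → Prop)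
    [DecidablePred c] (h : ∀ e ∈ ents, c e) (acc : Option (Int × Int)) :
    ents.foldl (fun b e => if c e then pvMerge b (some e.2) else b) acc =
      ents.foldl (fun b e => pvMerge b (some e.2)) acc := by
  induction ents generalizing acc with
  | nil => rfl
  | cons e es ihe =>
    simp only [List.foldl_cons, if_pos (h e List.mem_cons_self)]
    exact ihe (fun e' he' => h e' (List.mem_cons_of_mem _ he')) _

theorem pvLoop (vals : List Int) (hs : vals.Pairwise (· < ·)) :
    ∀ xs : List Int, (∀ x ∈ xs, x ∈ vals) → 1 ≤ vals.length →
      pvWF (xs.foldl (pvBStep vals vals.length) (pvBuild vals.length)) ∧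
      pvFlat (xs.foldl (pvBStep vals vals.length) (pvBuild vals.length)) =
        vals.map (pvBucket (pvEnts xs)) := by
  intro xs
  induction xs using List.reverseRecOn with
  | nil =>
    intro _ hm
    obtain ⟨hf, hw⟩ := pvBuild_flat vals.length hm
    rw [List.foldl_nil, hf, show pvEnts [] = [] from rfl, pvBucket_nil_map]
    exact ⟨hw, rfl⟩
  | append_singleton xs x ih =>
    intro hmem hm
    have hxv : x ∈ vals := hmem x (by simp)
    obtain ⟨hwf, hflat⟩ := ih (fun y hy => hmem y (by simp [hy])) hm
    obtain ⟨hrl, _⟩ := pvRankF_mem vals hs x hxv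
    have hlen : (pvFlat (xs.foldl (pvBStep vals vals.length) (pvBuild vals.length))).length
        = vals.length := by rw [hflat]; simp
    have hq : pvQuery (xs.foldl (pvBStep vals vals.length) (pvBuild vals.length))
        (pvRank vals 0 vals.length x) = pvBestLT (pvEnts xs) x := by
      rw [show pvRank vals 0 vals.length x = pvRankF vals x from rfl,
        pvQuery_eq _ _ hwf (by omega), hflat,
        pvGrouped vals hs (pvEnts xs) (fun e he => hmem e.1 (List.mem_append_left _ (pvEnts_fst_mem xs e he))) _
          (by omega)]
      unfold pvBestLT
      exact pvFoldl_if_congr (pvEnts xs) _ _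
        (fun e he => (pvRankF_lt_iff vals hs e.1 x
          (hmem e.1 (List.mem_append_left _ (pvEnts_fst_mem xs e he))) hxv).symm) none
    rw [List.foldl_append, List.foldl_cons, List.foldl_nil, pvBStep, hq, pvOut_match]
    obtain ⟨hfl', hwf'⟩ := pvUpdate_ok _ (pvRank vals 0 vals.length x)
      (pvOut x (pvBestLT (pvEnts xs) x)) hwf (by
        rw [show pvRank vals 0 vals.length x = pvRankF vals x from rfl]; omega)
    refine ⟨hwf', ?_⟩
    rw [hfl', hflat, pvEnts_append,
      pvBucket_map_append vals hs (pvEnts xs) (x, pvOut x (pvBestLT (pvEnts xs) x)) hxv]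
    rfl

theorem pvBestAll_concat_some (xs : List Int) (x : Int) :
    ∃ L S, pvBestAll (pvEnts (xs ++ [x])) = some (L, S) := by
  have h : ∀ (a : Option (Int × Int)) (v : Int × Int), ∃ L S, pvMerge a (some v) = some (L, S) := by
    intro a v
    rcases a with _ | ⟨l1, s1⟩ <;> rcases v with ⟨l2, s2⟩
    · exact ⟨l2, s2, rfl⟩
    · simp only [pvMerge]
      split_ifs <;> exact ⟨_, _, rfl⟩
  rw [pvEnts_append]
  unfold pvBestAll
  rw [List.foldl_append, List.foldl_cons, List.foldl_nil]
  exact h _ _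

theorem b_eq_clean (arr : List Int) : nonLisMaxSum_alt arr = pvCleanAns arr := by
  rw [nonLisMaxSum_alt_eq_named]
  simp only []
  have hmem : ∀ y, y ∈ PySem.List.sorted (PySem.Set.ofList arr) (fun v => v) ↔ y ∈ arr :=
    fun y => (PySem.List.sorted_perm _ _ _).mem_iff.trans (PySem.Set.mem_ofList arr y)
  by_cases hm : (PySem.List.sorted (PySem.Set.ofList arr) (fun v => v)).length = 0
  · rw [if_pos hm]
    have harr : arr = [] := by
      rcases harr : arr with _ | ⟨a, as⟩
      · rfl
      · exfalso
        have : a ∈ PySem.List.sorted (PySem.Set.ofList arr) (fun v => v) :=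
          (hmem a).mpr (by rw [harr]; simp)
        rw [List.length_eq_zero_iff.mp hm] at this
        simp at this
    subst harr
    rfl
  · rw [if_neg hm]
    have hs := PySem.List.sorted_ofList_pairwise_lt (xs := arr)
    obtain ⟨hwf, hflat⟩ := pvLoop _ hs arr (fun x hx => (hmem x).mpr hx) (by omega)
    have harr : arr ≠ [] := by
      intro h
      subst h
      simp [PySem.Set.ofList, PySem.List.sorted] at hm
    obtain ⟨ys, y, hcat⟩ := (List.eq_nil_or_concat arr).resolve_left harr
    have hbest' : ∃ L S, pvBestAll (pvEnts arr) = some (L, S) := by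
      rw [hcat, List.concat_eq_append]; exact pvBestAll_concat_some ys y
    obtain ⟨L, S, hbest⟩ := hbest'
    rw [pvQuery_eq _ _ hwf (by rw [hflat]; simp), hflat,
      pvGrouped _ hs (pvEnts arr) (fun e he => (hmem e.1).mpr (pvEnts_fst_mem arr e he)) _
        le_rfl]
    rw [pvFoldl_if_true (pvEnts arr) _ (fun e he =>
      (pvRankF_mem _ hs e.1 ((hmem e.1).mpr (pvEnts_fst_mem arr e he))).1) none]
    show (match pvBestAll (pvEnts arr) with
      | none => 0
      | some (_, s) => arr.sum - s) = pvCleanAns arr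
    unfold pvCleanAns
    rw [hbest]

-- ===== VERDICT (by name: the statement is the Claim_ definition above) =====
theorem nonLisMaxSum_spec : Claim_equal_nonLisMaxSum := by
  intro arr _
  unfold Spec_nonLisMaxSum
  rw [a_eq_clean, b_eq_clean]
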